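-- pv_equiv track=rewrite | github.com/alpbel0/e-commerce | ai-service/app/agents/visualization_agent.py | _notes_for_currency
-- ===== SOURCE A (Python) =====
-- from typing import Any, Dict, List, Optional
--
-- def _notes_for_currency(data: list[dict[str, Any]], currency_col: Optional[str], language: str) -> list[str]:
--     if not currency_col:
--         return []
--     values = {str(row.get(currency_col)).upper() for row in data if row.get(currency_col)}
--     if len(values) <= 1:
--         return []
--     return [
--         "Results contain multiple currencies; avoid reading them as a single total."
--         if language == "en"
--         else "Sonuclar birden fazla para birimi iceriyor; tek toplam gibi yorumlamayin."
--     ]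
-- ===== SOURCE B (Python) =====
-- def _notes_for_currency(data, currency_col, language):
--     if not currency_col:
--         return []
--     seen = None
--     for row in data:
--         raw = row.get(currency_col)
--         if not raw:
--             continue
--         v = str(raw).upper()
--         if seen is None:
--             seen = v
--         elif v != seen:
--             return [
--                 "Results contain multiple currencies; avoid reading them as a single total."
--                 if language == "en"
--                 else "Sonuclar birden fazla para birimi iceriyor; tek toplam gibi yorumlamayin."
--             ]
--     return []
-- ===== Notes on version B (the rewrite author's own statement) =====
-- stated objective: alternative
-- what changed: Replaces the set comprehension plus cardinality test with a single early-exit pass that tracks one 'seen' currency and returns the warning at the first mismatch, never materialising a set.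
import Mathlib
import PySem

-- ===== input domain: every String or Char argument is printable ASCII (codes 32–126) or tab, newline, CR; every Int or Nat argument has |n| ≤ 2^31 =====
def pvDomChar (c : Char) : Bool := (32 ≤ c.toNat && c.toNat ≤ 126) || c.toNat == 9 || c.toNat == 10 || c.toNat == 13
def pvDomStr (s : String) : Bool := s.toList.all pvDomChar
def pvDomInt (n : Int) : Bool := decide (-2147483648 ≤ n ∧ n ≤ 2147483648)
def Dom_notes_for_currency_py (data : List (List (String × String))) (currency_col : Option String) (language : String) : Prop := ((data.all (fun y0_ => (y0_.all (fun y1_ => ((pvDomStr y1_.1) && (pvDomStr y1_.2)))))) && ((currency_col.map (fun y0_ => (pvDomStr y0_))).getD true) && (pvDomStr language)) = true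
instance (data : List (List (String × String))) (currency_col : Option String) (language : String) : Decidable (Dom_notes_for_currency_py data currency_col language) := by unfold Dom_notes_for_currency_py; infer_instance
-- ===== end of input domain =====

-- B replaces A's set-comprehension-plus-cardinality test by a single early-exit pass
-- tracking one 'seen' currency; same warning strings and language branch.

-- ===== PORT A =====
-- the warning cell, shared verbatim by both ports (the Python string literals)
def pvWarn (language : String) : List String :=
  [if language = "en"
   then "Results contain multiple currencies; avoid reading them as a single total."
   else "Sonuclar birden fazla para birimi iceriyor; tek toplam gibi yorumlamayin."]

def notes_for_currency_py (data : List (List (String × String))) (currency_col : Option String) (language : String) : List String :=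
  match currency_col with
  | none => []
  | some col =>
    if col = "" then []
    else
      -- {str(row.get(currency_col)).upper() for row in data if row.get(currency_col)}
      let values : PySem.Set String :=
        PySem.Set.ofList (data.filterMap (fun row =>
          match (PySem.Dict.mk row).get? col with
          | none => none
          | some v => if v = "" then none else some (PySem.Str.upper v)))
      if values.length ≤ 1 then [] else pvWarn language

-- ===== PORT B =====
-- the for-loop of Source B: one pass, 'seen' is the single state variable, early return on mismatch
def pvLoopB (col language : String) : List (List (String × String)) → Option String → List String
  | [], _ => []
  | row :: rest, seen =>
    match (PySem.Dict.mk row).get? col with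
    | none => pvLoopB col language rest seen
    | some raw =>
      if raw = "" then pvLoopB col language rest seen
      else
        let v := PySem.Str.upper raw
        match seen with
        | none => pvLoopB col language rest (some v)
        | some s => if v ≠ s then pvWarn language else pvLoopB col language rest (some s)

def notes_for_currency_py_alt (data : List (List (String × String))) (currency_col : Option String) (language : String) : List String :=
  match currency_col with
  | none => []
  | some col =>
    if col = "" then []
    else pvLoopB col language data none

-- ===== PRECONDITION & SPEC =====
def Spec_notes_for_currency_py (data : List (List (String × String))) (currency_col : Option String) (language : String) (out : List String) : Prop := out = notes_for_currency_py_alt data currency_col language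
instance (data : List (List (String × String))) (currency_col : Option String) (language : String) (out : List String) : Decidable (Spec_notes_for_currency_py data currency_col language out) := by unfold Spec_notes_for_currency_py; infer_instance

-- ===== CLAIM (what is proved, stated in full; the proofs are below) =====
def Claim_equal_notes_for_currency_py : Prop := ∀ (data : List (List (String × String))) (currency_col : Option String) (language : String), Dom_notes_for_currency_py data currency_col language → Spec_notes_for_currency_py data currency_col language (notes_for_currency_py data currency_col language)

-- ===== LEMMAS AND PROOFS =====

-- the normalized currency values A collects, in row order
def pvVals (col : String) (data : List (List (String × String))) : List String :=
  data.filterMap (fun row =>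
    match (PySem.Dict.mk row).get? col with
    | none => none
    | some v => if v = "" then none else some (PySem.Str.upper v))

-- B's loop only depends on the normalized value stream
def pvLoopV (language : String) : List String → Option String → List String
  | [], _ => []
  | v :: rest, none => pvLoopV language rest (some v)
  | v :: rest, some s => if v ≠ s then pvWarn language else pvLoopV language rest (some s)

theorem pvLoopB_eq_loopV (col language : String) :
    ∀ (data : List (List (String × String))) (seen : Option String),
      pvLoopB col language data seen = pvLoopV language (pvVals col data) seen := by
  intro data
  induction data with
  | nil => intro seen; simp [pvLoopB, pvLoopV, pvVals]
  | cons row rest ih =>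
    intro seen
    simp only [pvLoopB, pvVals, List.filterMap_cons]
    cases h : (PySem.Dict.mk row).get? col with
    | none => simpa [pvVals] using ih seen
    | some v =>
      by_cases hv : v = ""
      · simpa [hv, pvVals] using ih seen
      · cases seen with
        | none => simpa [hv, pvVals, pvLoopV] using ih (some (PySem.Str.upper v))
        | some s =>
          by_cases hne : PySem.Str.upper v = s
          · simpa [hv, hne, pvVals, pvLoopV] using ih (some s)
          · simp [hv, hne, pvLoopV]

theorem pvLoopV_some (language : String) :
    ∀ (vs : List String) (s : String),
      pvLoopV language vs (some s) = if vs.all (fun v => v == s) then [] else pvWarn language := by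
  intro vs
  induction vs with
  | nil => intro s; rfl
  | cons v rest ih =>
    intro s
    by_cases h : v = s
    · simp [pvLoopV, h, ih]
    · simp [pvLoopV, h]

theorem pv_add_len_le (s : PySem.Set String) (x : String) :
    s.length ≤ (PySem.Set.add s x).length := by
  unfold PySem.Set.add
  split <;> simp

theorem pv_foldl_add_len_le :
    ∀ (l : List String) (s : PySem.Set String), s.length ≤ (l.foldl PySem.Set.add s).length := by
  intro l
  induction l with
  | nil => intro s; simp
  | cons x xs ih =>
    intro s
    exact le_trans (pv_add_len_le s x) (ih (PySem.Set.add s x))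

theorem pv_card_le_one_iff (u : String) :
    ∀ (rest : List String),
      ((PySem.Set.ofList (u :: rest)).length ≤ 1 ↔ rest.all (fun v => v == u)) := by
  intro rest
  induction rest with
  | nil => simp [PySem.Set.ofList, PySem.Set.add, PySem.Set.empty]
  | cons x xs ih =>
    by_cases h : x = u
    · simpa [PySem.Set.ofList, PySem.Set.add, PySem.Set.empty, PySem.Set.contains, h,
        List.foldl_cons] using ih
    · constructor
      · intro hle
        exfalso
        have h2 : 2 ≤ (xs.foldl PySem.Set.add [u, x]).length := by
          simpa using pv_foldl_add_len_le xs [u, x]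
        have : (PySem.Set.ofList (u :: x :: xs)).length = (xs.foldl PySem.Set.add [u, x]).length := by
          simp [PySem.Set.ofList, PySem.Set.add, PySem.Set.empty, PySem.Set.contains, h]
        omega
      · intro hall
        simp_all

-- ===== VERDICT (by name: the statement is the Claim_ definition above) =====
theorem notes_for_currency_py_spec : Claim_equal_notes_for_currency_py := by
  intro data currency_col language _
  unfold Spec_notes_for_currency_py notes_for_currency_py notes_for_currency_py_alt
  cases currency_col with
  | none => rfl
  | some col =>
    by_cases hcol : col = ""
    · simp [hcol]
    · simp only [hcol, if_false, pvLoopB_eq_loopV]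
      cases hv : pvVals col data with
      | nil =>
        have hfm : data.filterMap (fun row =>
            match (PySem.Dict.mk row).get? col with
            | none => none
            | some v => if v = "" then none else some (PySem.Str.upper v)) = [] := hv
        simp [hfm, pvLoopV]
      | cons u rest =>
        have hfm : data.filterMap (fun row =>
            match (PySem.Dict.mk row).get? col with
            | none => none
            | some v => if v = "" then none else some (PySem.Str.upper v)) = u :: rest := hv
        have hiff := pv_card_le_one_iff u rest
        simp only [hfm, pvLoopV, pvLoopV_some]
        by_cases hall : rest.all (fun v => v == u)
        · simp [hall, hiff.mpr hall]
        · have hn : ¬ (PySem.Set.ofList (u :: rest)).length ≤ 1 := fun h => hall (hiff.mp h)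
          simp [hall, hn]
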